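-- pv_equiv track=rewrite | github.com/Yohannes-Asfaw/competitive-programming | spreadsheet/number-of-times-binary-string-is-prefix-aligned.py | numTimesAllBlue
-- ===== SOURCE A (Python) =====
-- from typing import List
--
-- def numTimesAllBlue(flips: List[int]) -> int:
--     ones=0
--     maxindex=0
--     count=0
--     for i in flips:
--         ones+=1
--         maxindex=max(maxindex,i)
--         if ones==maxindex:
--             count+=1
--     return count
-- ===== SOURCE B (Python) =====
-- from typing import List
--
-- def numTimesAllBlue(flips: List[int]) -> int:
--     # Stage 1: extract the staircase of strict running-max records (value, 1-based
--     # position where it first becomes the running max), seeded with the sentinel (0, 0).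
--     records = [(0, 0)]
--     for pos, x in enumerate(flips, 1):
--         if x > records[-1][0]:
--             records.append((x, pos))
--     # Stage 2: each record (v, p) rules the constant-max segment of positions
--     # p .. q (q = position before the next record, or n for the last one);
--     # that segment contains an aligned moment iff v itself lies in [max(p,1), q].
--     n = len(flips)
--     count = 0
--     for k in range(len(records)):
--         v, p = records[k]
--         q = records[k + 1][1] - 1 if k + 1 < len(records) else n
--         if max(p, 1) <= v <= q:
--             count += 1
--     return count
-- ===== Notes on version B (the rewrite author's own statement) =====
-- stated objective: alternative
-- what changed: Replaces A's per-position running-max equality test by a record/segment algorithm: first extract the staircase of strict running-max records with their positions, then count one aligned moment per constant-max segment via an interval-containment check (max(p,1) <= v <= q).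
import Mathlib
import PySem

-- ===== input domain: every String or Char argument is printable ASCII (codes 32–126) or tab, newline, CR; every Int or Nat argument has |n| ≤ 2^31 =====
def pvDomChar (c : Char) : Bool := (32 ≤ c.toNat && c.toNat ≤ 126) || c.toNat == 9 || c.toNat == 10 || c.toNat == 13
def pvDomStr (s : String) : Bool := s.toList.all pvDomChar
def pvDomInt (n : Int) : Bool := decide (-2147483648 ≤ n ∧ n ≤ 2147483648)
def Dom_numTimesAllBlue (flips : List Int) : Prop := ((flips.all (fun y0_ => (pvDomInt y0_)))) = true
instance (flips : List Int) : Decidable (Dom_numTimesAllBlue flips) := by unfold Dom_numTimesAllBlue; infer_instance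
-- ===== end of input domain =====

-- B replaces A's per-position running-max equality loop by a record/segment algorithm (staircase of strict running-max records, then one interval-containment check per segment); objective: alternative, same cost.


-- ===== PORT A =====
-- state (ones, maxindex, count); for i in flips: ones += 1; maxindex = max(maxindex, i); if ones == maxindex: count += 1
def numTimesAllBlue (flips : List Int) : Int :=
  (flips.foldl
    (fun (s : Int × Int × Int) i =>
      let ones := s.1 + 1
      let maxindex := max s.2.1 i
      (ones, maxindex, if ones = maxindex then s.2.2 + 1 else s.2.2))
    (0, 0, 0)).2.2

-- ===== PORT B =====
-- stage 1 of Source B: the strict running-max records after the sentinel; 'last' is records[-1][0], 'pos' the 1-based position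
def recsB (last pos : Int) : List Int → List (Int × Int)
  | [] => []
  | x :: xs => if last < x then (x, pos) :: recsB x (pos + 1) xs else recsB last (pos + 1) xs

-- stage 2 of Source B: per record (v, p), q = next record's position - 1 (or n); count 1 if max(p,1) ≤ v ≤ q
def countSegsB (n : Int) : List (Int × Int) → Int
  | [] => 0
  | [(v, p)] => if max p 1 ≤ v ∧ v ≤ n then 1 else 0
  | (v, p) :: r :: rest => (if max p 1 ≤ v ∧ v ≤ r.2 - 1 then 1 else 0) + countSegsB n (r :: rest)

def numTimesAllBlue_alt (flips : List Int) : Int :=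
  countSegsB (flips.length : Int) ((0, 0) :: recsB 0 1 flips)

-- ===== PRECONDITION & SPEC =====
def Spec_numTimesAllBlue (flips : List Int) (out : Int) : Prop := out = numTimesAllBlue_alt flips
instance (flips : List Int) (out : Int) : Decidable (Spec_numTimesAllBlue flips out) := by unfold Spec_numTimesAllBlue; infer_instance

-- ===== CLAIM (what is proved, stated in full; the proofs are below) =====
def Claim_equal_numTimesAllBlue : Prop := ∀ (flips : List Int), Dom_numTimesAllBlue flips → Spec_numTimesAllBlue flips (numTimesAllBlue flips)

-- ===== LEMMAS AND PROOFS =====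

-- A's loop body as a named function (definitionally equal to the lambda in the port)
def stepA (s : Int × Int × Int) (i : Int) : Int × Int × Int :=
  (s.1 + 1, max s.2.1 i, if s.1 + 1 = max s.2.1 i then s.2.2 + 1 else s.2.2)

-- Invariant tying A's fold on the remaining input (positions pos..) to B's segments: the current
-- record is (mx, p) with p < pos; the correction term accounts for the aligned moment of the
-- current segment when it lies at an already-passed position (then A counted it before pos).
theorem foldA_segs (xs : List Int) : ∀ (pos mx p c : Int), 1 ≤ pos → p < pos →
    (xs.foldl stepA (pos - 1, mx, c)).2.2
      + (if max p 1 ≤ mx ∧ mx ≤ pos - 1 then 1 else 0)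
    = c + countSegsB (pos - 1 + (xs.length : Int)) ((mx, p) :: recsB mx pos xs) := by
  induction xs with
  | nil => intro pos mx p c h1 h2; simp [recsB, countSegsB]
  | cons x xs ih =>
      intro pos mx p c h1 h2
      have hpos : pos - 1 + 1 = pos := by ring
      have hstep : stepA (pos - 1, mx, c) x
          = (pos, max mx x, if pos = max mx x then c + 1 else c) := by
        simp only [stepA, hpos]
      rw [List.foldl_cons, hstep]
      have hlen : pos - 1 + (((x :: xs).length : Int)) = pos + ((xs.length : Int)) := by
        push_cast [List.length_cons]; ring
      rw [hlen]
      by_cases hx : mx < x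
      · -- new record (x, pos)
        have hmax : max mx x = x := by omega
        rw [hmax]
        have this := ih (pos + 1) x pos (if pos = x then c + 1 else c) (by omega) (by omega)
        have hpos' : pos + 1 - 1 = pos := by ring
        rw [hpos'] at this
        simp only [recsB, if_pos hx, countSegsB]
        split_ifs at this ⊢ <;> omega
      · -- mx stays the running max
        have hmax : max mx x = mx := by omega
        rw [hmax]
        have this := ih (pos + 1) mx p (if pos = mx then c + 1 else c) (by omega) (by omega)
        have hpos' : pos + 1 - 1 = pos := by ring
        rw [hpos'] at this
        simp only [recsB, if_neg hx]
        split_ifs at this ⊢ <;> omega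

-- ===== VERDICT (by name: the statement is the Claim_ definition above) =====
theorem numTimesAllBlue_spec : Claim_equal_numTimesAllBlue := by
  intro flips _
  unfold Spec_numTimesAllBlue numTimesAllBlue_alt
  have hA : numTimesAllBlue flips = (flips.foldl stepA (0, 0, 0)).2.2 := rfl
  rw [hA]
  have this := foldA_segs flips 1 0 0 0 (by omega) (by omega)
  simp only [show (1:Int) - 1 = 0 from rfl, zero_add] at this
  have hz : (if max (0:Int) 1 ≤ 0 ∧ (0:Int) ≤ 0 then (1:Int) else 0) = 0 := by norm_num
  rw [hz] at this
  omega
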